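-- pv_equiv track=rewrite | github.com/Ant-man74/MMOpt-Gen | CGM.py | FindTi
-- ===== SOURCE A (Python) =====
-- def FindTi(Ti1,alpha,beta):
--     Ti=[Ti1[0]]
--     for i in range(1,len(Ti1)):
--         if Ti1[i]>=Ti[i-1]+alpha:
--             Ti.insert(i,Ti[i-1]+alpha)
--         else:
--             Ti.insert(i,Ti1[i])
--     return Ti
-- ===== SOURCE B (Python) =====
-- from itertools import accumulate
--
-- def FindTi(Ti1, alpha, beta):
--     # Potential transform: with s[j] = Ti1[j] - j*alpha the result is
--     # Ti[i] = min_{j<=i} (Ti1[j] + (i-j)*alpha) = (prefix minimum of s)[i] + i*alpha,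
--     # so the alpha-capped recurrence reduces to a plain running minimum.
--     shifted = [x - j * alpha for j, x in enumerate(Ti1)]
--     mins = accumulate(shifted, min)
--     return [m + i * alpha for i, m in enumerate(mins)]
-- ===== Notes on version B (the rewrite author's own statement) =====
-- stated objective: alternative
-- what changed: Replaced A's carried alpha-cap recurrence (each element from the previous via Ti[i-1]+alpha, conditional insert) by a potential transform: shift values by -j*alpha, take a plain prefix minimum, shift back by +i*alpha.
import Mathlib
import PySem

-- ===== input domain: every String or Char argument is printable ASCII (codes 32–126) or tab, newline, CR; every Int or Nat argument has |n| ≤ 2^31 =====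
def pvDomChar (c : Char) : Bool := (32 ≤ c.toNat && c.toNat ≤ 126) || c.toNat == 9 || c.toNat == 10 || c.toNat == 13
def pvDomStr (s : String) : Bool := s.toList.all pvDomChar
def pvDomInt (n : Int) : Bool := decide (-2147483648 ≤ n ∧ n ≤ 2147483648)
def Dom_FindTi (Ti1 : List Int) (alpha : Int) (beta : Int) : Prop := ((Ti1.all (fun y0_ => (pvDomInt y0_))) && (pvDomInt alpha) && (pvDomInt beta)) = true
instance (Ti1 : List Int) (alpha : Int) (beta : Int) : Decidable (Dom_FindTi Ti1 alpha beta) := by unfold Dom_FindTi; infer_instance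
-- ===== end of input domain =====

-- B replaces A's carried alpha-cap recurrence (Ti[i-1]+alpha with list.insert) by a potential
-- transform — shift by -j*alpha, plain prefix minimum, shift back by +i*alpha — same values (alternative).

-- ===== PORT A =====
-- literal transliteration: Ti starts as [Ti1[0]]; for i in range(1, len(Ti1)) the loop
-- reads Ti1[i] and Ti[i-1] (always in range; pyGetD's default 0 is never used) and inserts at i.
def FindTi (Ti1 : List Int) (alpha : Int) (beta : Int) : List Int :=
  (PySem.List.pyRange 1 (Ti1.length : Int) 1).foldl
    (fun Ti i =>
      if PySem.List.pyGetD Ti1 i 0 ≥ PySem.List.pyGetD Ti (i - 1) 0 + alpha then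
        PySem.List.insert Ti i (PySem.List.pyGetD Ti (i - 1) 0 + alpha)
      else
        PySem.List.insert Ti i (PySem.List.pyGetD Ti1 i 0))
    [PySem.List.pyGetD Ti1 0 0]

-- ===== PORT B =====
-- transliteration of Source B: shifted = [x - j*alpha for j,x in enumerate(Ti1)];
-- mins = itertools.accumulate(shifted, min)  (pyAccumMin is the accumulate tail);
-- [m + i*alpha for i,m in enumerate(mins)].
def pyAccumMin (a : Int) : List Int → List Int
  | [] => []
  | x :: xs => let b := min a x; b :: pyAccumMin b xs

def FindTi_alt (Ti1 : List Int) (alpha : Int) (beta : Int) : List Int :=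
  let shifted := (PySem.List.enumerate Ti1 0).map (fun p => p.2 - p.1 * alpha)
  let mins := match shifted with
    | [] => []
    | s0 :: rest => s0 :: pyAccumMin s0 rest
  (PySem.List.enumerate mins 0).map (fun p => p.2 + p.1 * alpha)

-- ===== PRECONDITION & SPEC =====
-- Pre_ excludes exactly the empty list, on which A raises IndexError at Ti1[0].
def Pre_FindTi (Ti1 : List Int) (alpha : Int) (beta : Int) : Prop := Ti1 ≠ []
instance (Ti1 : List Int) (alpha : Int) (beta : Int) : Decidable (Pre_FindTi Ti1 alpha beta) := by unfold Pre_FindTi; infer_instance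
def pvWitness_FindTi : List Int × Int × Int := ([3, 10, 4, 9], 2, 0)

def Spec_FindTi (Ti1 : List Int) (alpha : Int) (beta : Int) (out : List Int) : Prop := out = FindTi_alt Ti1 alpha beta
instance (Ti1 : List Int) (alpha : Int) (beta : Int) (out : List Int) : Decidable (Spec_FindTi Ti1 alpha beta out) := by unfold Spec_FindTi; infer_instance

-- ===== CLAIM (what is proved, stated in full; the proofs are below) =====
def Claim_equal_FindTi : Prop := ∀ (Ti1 : List Int) (alpha : Int) (beta : Int), Dom_FindTi Ti1 alpha beta → Pre_FindTi Ti1 alpha beta → Spec_FindTi Ti1 alpha beta (FindTi Ti1 alpha beta)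

-- ===== LEMMAS AND PROOFS =====

-- Proof-side scan: both programs are shown equal to x :: pyAccum (fun p y => min (p+alpha) y) x xs.
def pyAccum (f : Int → Int → Int) (a : Int) : List Int → List Int
  | [] => []
  | x :: xs => let b := f a x; b :: pyAccum f b xs

-- One loop step of A, applied to an accumulator acc of length i = pre.length (so Ti[i-1] is
-- acc's last element and insert at i appends), produces acc ++ [min (last+alpha) x].
theorem FindTi_loop (alpha : Int) (xs : List Int) :
    ∀ (pre acc : List Int) (a : Int), acc ≠ [] → acc.length = pre.length →
      acc.getLast? = some a →
      (PySem.List.pyRange (pre.length : Int) ((pre ++ xs).length : Int) 1).foldl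
        (fun Ti i =>
          if PySem.List.pyGetD (pre ++ xs) i 0 ≥ PySem.List.pyGetD Ti (i - 1) 0 + alpha then
            PySem.List.insert Ti i (PySem.List.pyGetD Ti (i - 1) 0 + alpha)
          else
            PySem.List.insert Ti i (PySem.List.pyGetD (pre ++ xs) i 0)) acc
      = acc ++ pyAccum (fun prev y => min (prev + alpha) y) a xs := by
  induction xs with
  | nil =>
    intro pre acc a _ _ _
    simp [PySem.List.pyRange_one_eq_nil, pyAccum]
  | cons x xs ih =>
    intro pre acc a hne hlen hlast
    have hlt : (pre.length : Int) < ((pre ++ x :: xs).length : Int) := by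
      simp
    rw [PySem.List.pyRange_one_cons hlt, List.foldl_cons]
    have hx : PySem.List.pyGetD (pre ++ x :: xs) (pre.length : Int) 0 = x := by
      simp [PySem.List.pyGetD]
    have hprev : PySem.List.pyGetD acc ((pre.length : Int) - 1) 0 = a := by
      have h1 : ((pre.length : Int) - 1) = ((acc.length - 1 : Nat) : Int) := by
        rw [hlen]; have : 0 < acc.length := List.length_pos_iff.mpr hne
        omega
      rw [h1, PySem.List.pyGetD_natCast]
      have h2 : acc.length - 1 < acc.length := by
        have : 0 < acc.length := List.length_pos_iff.mpr hne
        omega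
      rw [List.getD_eq_getElem _ _ h2]
      have := List.getLast?_eq_getElem? (l := acc)
      rw [this] at hlast
      simp only [List.getElem?_eq_some_iff] at hlast
      obtain ⟨h3, h4⟩ := hlast
      exact h4
    have hins : ∀ v : Int, PySem.List.insert acc (pre.length : Int) v = acc ++ [v] := by
      intro v
      have : (pre.length : Int) = (acc.length : Int) := by rw [hlen]
      rw [this]
      exact PySem.List.insert_len acc v
    rw [hx, hprev]
    set b := min (a + alpha) x with hb
    have hstep : (if x ≥ a + alpha then PySem.List.insert acc (pre.length : Int) (a + alpha)
        else PySem.List.insert acc (pre.length : Int) x) = acc ++ [b] := by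
      split_ifs with h
      · rw [hins]; congr 1; simp [hb]; omega
      · rw [hins]; congr 1; simp [hb]; omega
    rw [hstep]
    have hre : pre ++ x :: xs = (pre ++ [x]) ++ xs := by simp
    have hlen2 : ((pre.length : Int) + 1) = ((pre ++ [x]).length : Int) := by simp
    rw [hre, hlen2]
    rw [ih (pre ++ [x]) (acc ++ [b]) b (by simp) (by simp [hlen]) (by simp)]
    simp [pyAccum, hb]

-- The potential transform undone: un-shifting the running minimum of the alpha-shifted
-- values (enumerate start s) recovers the alpha-capped scan.
theorem accum_scan (alpha : Int) (xs : List Int) :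
    ∀ (x s : Int),
      (PySem.List.enumerate
          ((x - s * alpha) :: pyAccumMin (x - s * alpha)
            ((PySem.List.enumerate xs (s + 1)).map (fun p => p.2 - p.1 * alpha))) s).map
        (fun p => p.2 + p.1 * alpha)
      = x :: pyAccum (fun prev y => min (prev + alpha) y) x xs := by
  induction xs with
  | nil =>
    intro x s
    simp [pyAccumMin, pyAccum, PySem.List.enumerate_cons]
  | cons y ys ih =>
    intro x s
    have hmin : min (x - s * alpha) (y - (s + 1) * alpha)
        = min (x + alpha) y - (s + 1) * alpha := by
      rcases le_total (x + alpha) y with h | h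
      · rw [min_eq_left h, min_eq_left (by nlinarith [h])]
        ring
      · rw [min_eq_right h, min_eq_right (by nlinarith [h])]
    simp only [PySem.List.enumerate_cons, List.map_cons, pyAccumMin, hmin]
    have h := ih (min (x + alpha) y) (s + 1)
    simp only [PySem.List.enumerate_cons, List.map_cons] at h
    obtain ⟨-, h2⟩ := List.cons_eq_cons.mp h
    rw [show x - s * alpha + s * alpha = x by ring,
      show min (x + alpha) y - (s + 1) * alpha + (s + 1) * alpha = min (x + alpha) y by ring, h2]
    simp [pyAccum]

-- B on a nonempty list is the same scan.
theorem FindTi_alt_eq_scan (alpha beta x : Int) (xs : List Int) :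
    FindTi_alt (x :: xs) alpha beta
      = x :: pyAccum (fun prev y => min (prev + alpha) y) x xs := by
  unfold FindTi_alt
  simp only [PySem.List.enumerate_cons, List.map_cons]
  have h := accum_scan alpha xs x 0
  rw [show x - 0 * alpha = x by ring, show (0 : Int) + 1 = 1 by ring] at h
  simpa using h

theorem FindTi_spec : Claim_equal_FindTi := by
  intro Ti1 alpha beta _ hpre
  unfold Spec_FindTi
  match Ti1, hpre with
  | x :: xs, _ =>
    rw [FindTi_alt_eq_scan]
    unfold FindTi
    have h0 : PySem.List.pyGetD (x :: xs) 0 0 = x := PySem.List.pyGetD_zero_cons x xs 0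
    rw [h0]
    have h1 : (1 : Int) = (([x] : List Int).length : Int) := by simp
    have h2 : x :: xs = [x] ++ xs := rfl
    rw [h2, h1]
    exact FindTi_loop alpha xs [x] [x] x (by simp) (by simp) (by simp)
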